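-- pv_equiv track=rewrite | github.com/dahaihu/standard | leetcode/KMP.py | func
-- ===== SOURCE A (Python) =====
-- def func(s):
--     res = [0 for _ in range(len(s))]
--     # i 代指的是长度
--     for i in range(1, len(s) + 1):
--         cur = 0
--         tmp = s[:i]
--         # j 也代指的是长度，代表的是
--         for j in range(1, i):
--             if tmp[:j] == tmp[-j:] and j > cur:
--                 cur = j
--         res[i - 1] = i - cur
--     return res
-- ===== SOURCE B (Python) =====
-- def func(s):
--     n = len(s)
--     pi = [0] * (1 if n else 0)
--     for i in range(1, n):
--         k = pi[i - 1]
--         while k and s[i] != s[k]: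
--             k = pi[k - 1]
--         if s[i] == s[k]:
--             k += 1
--         pi.append(k)
--     return [i + 1 - pi[i] for i in range(n)]
-- ===== Notes on version B (the rewrite author's own statement) =====
-- stated objective: faster
-- what changed: Replaced the per-prefix brute-force scan over all split points with slice comparisons (O(n^3)) by the KMP prefix function computed in one pass, returning i+1 - pi[i] per prefix.
import Mathlib
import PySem

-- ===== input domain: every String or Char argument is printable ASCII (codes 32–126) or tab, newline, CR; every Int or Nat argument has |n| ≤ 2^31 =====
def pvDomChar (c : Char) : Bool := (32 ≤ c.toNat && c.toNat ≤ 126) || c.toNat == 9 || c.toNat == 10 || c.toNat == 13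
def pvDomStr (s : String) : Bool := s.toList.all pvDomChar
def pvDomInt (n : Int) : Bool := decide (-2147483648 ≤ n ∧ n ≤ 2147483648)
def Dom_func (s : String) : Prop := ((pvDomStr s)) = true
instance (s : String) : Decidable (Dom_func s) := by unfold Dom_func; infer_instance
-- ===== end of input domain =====

-- B replaces A's cubic per-prefix brute-force border search by the linear-time KMP prefix function (objective: faster, asymptotic).

-- ===== PORT A =====
-- inner loop of A: cur = max j in [1, i) with tmp[:j] == tmp[-j:]
def curLoop (tmp : List Char) (i : Int) : Int :=
  (PySem.List.pyRange 1 i 1).foldl (fun cur j =>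
    if PySem.List.slice tmp none (some j) = PySem.List.slice tmp (some (-j)) none ∧ j > cur
    then j else cur) 0

def func (s : String) : List Int :=
  let l := s.toList
  let n : Int := PySem.Str.len s
  let res0 : List Int := (PySem.List.pyRange 0 n 1).map (fun _ => 0)
  (PySem.List.pyRange 1 (n + 1) 1).foldl (fun res i =>
    let tmp := PySem.List.slice l none (some i)
    let cur := curLoop tmp i
    PySem.List.pySetD res (i - 1) (i - cur)) res0

-- ===== PORT B =====
-- the 'while k and s[i] != s[k]: k = pi[k-1]' loop of Source B; 'min … (k-1)' is a totality
-- guard only (pi entries are below their index + 1, proved below, so it never changes the value)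
def kmpFall (pi : List Nat) (l : List Char) (c : Char) (k : Nat) : Nat :=
  if 0 < k ∧ l.getD k ' ' ≠ c then
    kmpFall pi l c (min (pi.getD (k - 1) 0) (k - 1))
  else k
termination_by k
decreasing_by omega

-- body of Source B's for-loop
def kmpStep (l : List Char) (pi : List Nat) (i : Nat) : List Nat :=
  let k0 := kmpFall pi l (l.getD i ' ') (pi.getD (i - 1) 0)
  let k := if l.getD i ' ' = l.getD k0 ' ' then k0 + 1 else k0
  pi ++ [k]

def kmpPi (l : List Char) : List Nat :=
  (List.range' 1 (l.length - 1)).foldl (kmpStep l) (if l.length = 0 then [] else [0])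

def func_alt (s : String) : List Int :=
  let l := s.toList
  let pi := kmpPi l
  (List.range l.length).map (fun i : Nat => ((i : Int) + 1 - ((pi.getD i 0 : Nat) : Int)))

-- ===== PRECONDITION & SPEC =====
def Spec_func (s : String) (out : List Int) : Prop := out = func_alt s
instance (s : String) (out : List Int) : Decidable (Spec_func s out) := by unfold Spec_func; infer_instance

-- ===== CLAIM (what is proved, stated in full; the proofs are below) =====
def Claim_equal_func : Prop := ∀ (s : String), Dom_func s → Spec_func s (func s)

-- ===== LEMMAS AND PROOFS =====

-- 'k is a border length of the prefix of length i' (k = 0 and k = i allowed here)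
def Bo (l : List Char) (i k : Nat) : Prop := k ≤ i ∧ l.take k = (l.take i).drop (i - k)

-- 'k is the longest proper border length of the prefix of length i'
def MB (l : List Char) (i k : Nat) : Prop :=
  k < i ∧ Bo l i k ∧ ∀ j, j < i → Bo l i j → j ≤ k

theorem Bo_zero (l : List Char) (i : Nat) : Bo l i 0 := by
  refine ⟨Nat.zero_le _, ?_⟩
  simp

theorem MB_unique {l : List Char} {i k k' : Nat} (h : MB l i k) (h' : MB l i k') : k = k' :=
  Nat.le_antisymm (h'.2.2 k h.1 h.2.1) (h.2.2 k' h'.1 h'.2.1)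

theorem Bo_succ (l : List Char) {i k : Nat} (hk : k ≤ i) (hi : i < l.length) :
    Bo l (i + 1) (k + 1) ↔ Bo l i k ∧ l.getD k ' ' = l.getD i ' ' := by
  have hkl : k < l.length := Nat.lt_of_le_of_lt hk hi
  have hti : (l.take i).length = i := by simp [Nat.le_of_lt hi]
  have e1 : l.take (k + 1) = l.take k ++ [l.getD k ' '] := by
    rw [List.take_succ]
    simp [List.getElem?_eq_getElem hkl, List.getD_eq_getElem _ _ hkl]
  have e2 : l.take (i + 1) = l.take i ++ [l.getD i ' '] := by
    rw [List.take_succ]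
    simp [List.getElem?_eq_getElem hi, List.getD_eq_getElem _ _ hi]
  have e3 : (l.take i ++ [l.getD i ' ']).drop (i - k) =
      (l.take i).drop (i - k) ++ [l.getD i ' '] :=
    List.drop_append_of_le_length (by omega)
  unfold Bo
  rw [Nat.succ_sub_succ, e1, e2, e3]
  constructor
  · rintro ⟨-, h⟩
    obtain ⟨h1, h2⟩ := List.append_inj' h (by simp)
    exact ⟨⟨hk, h1⟩, by simpa using h2⟩
  · rintro ⟨⟨-, hb⟩, hc⟩
    exact ⟨by omega, by rw [hb, hc]⟩

theorem Bo_trans_down {l : List Char} {i j k : Nat}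
    (hj : Bo l i j) (hk : Bo l i k) (hjk : j ≤ k) : Bo l k j := by
  obtain ⟨hji, ej⟩ := hj
  obtain ⟨hki, ek⟩ := hk
  refine ⟨hjk, ?_⟩
  rw [ek, List.drop_drop]
  have harith : (i - k) + (k - j) = i - j := by omega
  rw [harith]
  exact ej

theorem Bo_trans_up {l : List Char} {i j k : Nat}
    (hj : Bo l k j) (hk : Bo l i k) : Bo l i j := by
  obtain ⟨hjk, ej⟩ := hj
  obtain ⟨hki, ek⟩ := hk
  refine ⟨Nat.le_trans hjk hki, ?_⟩
  rw [ej, ek, List.drop_drop]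
  congr 1
  omega

theorem kmpFall_spec (l : List Char) (i : Nat) (hi : i < l.length) (pi : List Nat)
    (hpi : ∀ m, m < i → MB l (m + 1) (pi.getD m 0)) :
    ∀ k, k < i → Bo l i k →
    (∀ j, 0 < j → j < i → Bo l i j → l.getD j ' ' = l.getD i ' ' → j ≤ k) →
    (kmpFall pi l (l.getD i ' ') k < i ∧ Bo l i (kmpFall pi l (l.getD i ' ') k) ∧
     (∀ j, 0 < j → j < i → Bo l i j → l.getD j ' ' = l.getD i ' ' → j ≤ kmpFall pi l (l.getD i ' ') k) ∧
     (kmpFall pi l (l.getD i ' ') k = 0 ∨ l.getD (kmpFall pi l (l.getD i ' ') k) ' ' = l.getD i ' ')) := by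
  intro k
  induction k using Nat.strong_induction_on with
  | _ k IH =>
    intro hki hbo hmax
    rw [kmpFall]
    split_ifs with hcond
    · obtain ⟨hk0, hne⟩ := hcond
      have hmb := hpi (k - 1) (by omega)
      rw [Nat.sub_add_cancel hk0] at hmb
      have hk'k : pi.getD (k - 1) 0 < k := hmb.1
      have hmin : min (pi.getD (k - 1) 0) (k - 1) = pi.getD (k - 1) 0 := by omega
      rw [hmin]
      apply IH (pi.getD (k - 1) 0) hk'k (by omega) (Bo_trans_up hmb.2.1 hbo)
      intro j hj0 hji hbj hcj
      have hjk : j ≤ k := hmax j hj0 hji hbj hcj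
      have hjne : j ≠ k := by rintro rfl; exact hne hcj
      have hbkj : Bo l k j := Bo_trans_down hbj hbo hjk
      exact hmb.2.2 j (by omega) hbkj
    · push_neg at hcond
      refine ⟨hki, hbo, hmax, ?_⟩
      rcases Nat.eq_zero_or_pos k with h0 | hpos
      · exact Or.inl h0
      · exact Or.inr (hcond hpos)

theorem kmpStep_spec (l : List Char) (i : Nat) (h1 : 1 ≤ i) (hi : i < l.length) (pi : List Nat)
    (hlen : pi.length = i) (hpi : ∀ m, m < i → MB l (m + 1) (pi.getD m 0)) :
    (kmpStep l pi i).length = i + 1 ∧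
    (∀ m, m < i + 1 → MB l (m + 1) ((kmpStep l pi i).getD m 0)) := by
  have hinit := hpi (i - 1) (by omega)
  rw [Nat.sub_add_cancel h1] at hinit
  have hspec := kmpFall_spec l i hi pi hpi (pi.getD (i - 1) 0) hinit.1 hinit.2.1
      (fun j _ hji hbj _ => hinit.2.2 j hji hbj)
  obtain ⟨hk0i, hbo0, hmax0, hlast⟩ := hspec
  have hred : kmpStep l pi i = pi ++
      [if l.getD i ' ' = l.getD (kmpFall pi l (l.getD i ' ') (pi.getD (i - 1) 0)) ' '
       then kmpFall pi l (l.getD i ' ') (pi.getD (i - 1) 0) + 1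
       else kmpFall pi l (l.getD i ' ') (pi.getD (i - 1) 0)] := rfl
  rw [hred]
  refine ⟨by simp [hlen], ?_⟩
  intro m hm
  rcases Nat.lt_or_ge m i with hmi | hmi
  · have hg : (pi ++ [if l.getD i ' ' = l.getD (kmpFall pi l (l.getD i ' ') (pi.getD (i - 1) 0)) ' '
        then kmpFall pi l (l.getD i ' ') (pi.getD (i - 1) 0) + 1
        else kmpFall pi l (l.getD i ' ') (pi.getD (i - 1) 0)]).getD m 0 = pi.getD m 0 := by
      rw [List.getD_append _ _ _ _ (by omega)]
    rw [hg]
    exact hpi m hmi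
  · have hmeq : m = i := by omega
    subst hmeq
    have hg : ∀ x : Nat, (pi ++ [x]).getD m 0 = x := by
      intro x
      rw [List.getD_append_right _ _ _ _ (by omega)]
      simp [hlen]
    set k0 := kmpFall pi l (l.getD m ' ') (pi.getD (m - 1) 0) with hk0def
    by_cases hc : l.getD m ' ' = l.getD k0 ' '
    · rw [if_pos hc, hg]
      refine ⟨by omega, (Bo_succ l (Nat.le_of_lt hk0i) hi).2 ⟨hbo0, hc.symm⟩, ?_⟩
      intro j hj hbj
      match j with
      | 0 => omega
      | j' + 1 =>
        have hd := (Bo_succ l (show j' ≤ m by omega) hi).1 hbj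
        rcases Nat.eq_zero_or_pos j' with h0 | hpos
        · omega
        · have := hmax0 j' hpos (by omega) hd.1 hd.2
          omega
    · rw [if_neg hc, hg]
      have hk00 : k0 = 0 := by
        rcases hlast with h | h
        · exact h
        · exact absurd h.symm hc
      refine ⟨by omega, hk00 ▸ Bo_zero l (m + 1), ?_⟩
      intro j hj hbj
      match j with
      | 0 => omega
      | j' + 1 =>
        have hd := (Bo_succ l (show j' ≤ m by omega) hi).1 hbj
        rcases Nat.eq_zero_or_pos j' with h0 | hpos
        · subst h0
          rw [hk00] at hc
          exact absurd hd.2.symm hc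
        · have := hmax0 j' hpos (by omega) hd.1 hd.2
          omega

theorem kmpPi_loop (l : List Char) : ∀ (m i0 : Nat) (pi : List Nat), 1 ≤ i0 →
    pi.length = i0 → i0 + m ≤ l.length →
    (∀ j, j < i0 → MB l (j + 1) (pi.getD j 0)) →
    ((List.range' i0 m).foldl (kmpStep l) pi).length = i0 + m ∧
    (∀ j, j < i0 + m → MB l (j + 1) (((List.range' i0 m).foldl (kmpStep l) pi).getD j 0)) := by
  intro m
  induction m with
  | zero =>
    intro i0 pi h1 hlen hle hpi
    simpa using ⟨hlen, fun j hj => hpi j (by omega)⟩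
  | succ m IH =>
    intro i0 pi h1 hlen hle hpi
    rw [List.range'_succ]
    simp only [List.foldl_cons]
    have hstep := kmpStep_spec l i0 h1 (by omega) pi hlen hpi
    have hrec := IH (i0 + 1) (kmpStep l pi i0) (by omega) hstep.1 (by omega) hstep.2
    exact ⟨hrec.1.trans (by omega), fun j hj => hrec.2 j (by omega)⟩

theorem kmpPi_spec (l : List Char) : ∀ i, i < l.length → MB l (i + 1) ((kmpPi l).getD i 0) := by
  intro i hi
  unfold kmpPi
  rw [if_neg (by omega)]
  have hbase : ∀ j, j < 1 → MB l (j + 1) (([0] : List Nat).getD j 0) := by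
    intro j hj
    have : j = 0 := by omega
    subst this
    exact (show MB l 1 0 from ⟨by omega, Bo_zero l 1, fun j' hj' _ => by omega⟩)
  have := kmpPi_loop l (l.length - 1) 1 [0] le_rfl rfl (by omega) hbase
  exact this.2 i (by omega)

-- A-side: the inner fold computes the maximum border length
def Q (tmp : List Char) (j : Nat) : Prop := tmp.take j = tmp.drop (tmp.length - j)

theorem curLoop_spec (tmp : List Char) : ∀ m : Nat,
    0 ≤ curLoop tmp (m : Int) ∧
    ((curLoop tmp (m : Int)) = 0 ∨
      (0 < (curLoop tmp (m : Int)).toNat ∧ (curLoop tmp (m : Int)).toNat < m ∧ Q tmp (curLoop tmp (m : Int)).toNat)) ∧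
    (∀ j : Nat, 0 < j → j < m → Q tmp j → j ≤ (curLoop tmp (m : Int)).toNat) := by
  intro m
  induction m with
  | zero =>
    have h0 : curLoop tmp ((0 : Nat) : Int) = 0 := by
      unfold curLoop
      rw [PySem.List.pyRange_one_eq_nil (by norm_num)]
      rfl
    rw [h0]
    exact ⟨le_rfl, Or.inl rfl, fun j hj hj0 _ => by omega⟩
  | succ m IH =>
    rcases Nat.eq_zero_or_pos m with h0 | hpos
    · subst h0
      have h1 : curLoop tmp ((1 : Nat) : Int) = 0 := by
        unfold curLoop
        rw [PySem.List.pyRange_one_eq_nil (by norm_num)]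
        rfl
      rw [h1]
      exact ⟨le_rfl, Or.inl rfl, fun j hj hj0 _ => by omega⟩
    · have hcast : ((m + 1 : Nat) : Int) = (m : Int) + 1 := by push_cast; ring
      have hstep : curLoop tmp ((m + 1 : Nat) : Int) =
          (if PySem.List.slice tmp none (some (m : Int)) = PySem.List.slice tmp (some (-(m : Int))) none ∧
              (m : Int) > curLoop tmp (m : Int)
           then (m : Int) else curLoop tmp (m : Int)) := by
        unfold curLoop
        rw [hcast, PySem.List.pyRange_one_succ_right (by exact_mod_cast hpos), List.foldl_append]
        simp only [List.foldl_cons, List.foldl_nil]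
      rw [hstep, PySem.List.slice_to_natCast, PySem.List.slice_from_neg_natCast tmp m hpos]
      obtain ⟨IH0, IHor, IHmax⟩ := IH
      split_ifs with hcond
      · obtain ⟨hq, hgt⟩ := hcond
        refine ⟨Int.natCast_nonneg m, Or.inr ⟨by simpa using hpos, by simp, by simpa [Q] using hq⟩, ?_⟩
        intro j hj0 hjm hqj
        rcases Nat.lt_succ_iff_lt_or_eq.1 hjm with h | h
        · have h1 := IHmax j hj0 h hqj
          simp only [Int.toNat_natCast]
          omega
        · subst h
          simp
      · refine ⟨IH0, ?_, ?_⟩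
        · rcases IHor with h | h
          · exact Or.inl h
          · exact Or.inr ⟨h.1, by omega, h.2.2⟩
        · intro j hj0 hjm hqj
          rcases Nat.lt_succ_iff_lt_or_eq.1 hjm with h | h
          · exact IHmax j hj0 h hqj
          · subst h
            exfalso
            exact hcond ⟨hqj, by omega⟩

theorem curLoop_MB (l : List Char) (i : Nat) (hi : i < l.length) :
    0 ≤ curLoop (l.take (i + 1)) ((i : Int) + 1) ∧
    MB l (i + 1) (curLoop (l.take (i + 1)) ((i : Int) + 1)).toNat := by
  have hcast : ((i : Int) + 1) = ((i + 1 : Nat) : Int) := by push_cast; ring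
  rw [hcast]
  obtain ⟨h0, hor, hmax⟩ := curLoop_spec (l.take (i + 1)) (i + 1)
  have htl : (l.take (i + 1)).length = i + 1 := by simp; omega
  have hQBo : ∀ j, j ≤ i + 1 → (Q (l.take (i + 1)) j ↔ Bo l (i + 1) j) := by
    intro j hj
    unfold Q Bo
    rw [htl, List.take_take, Nat.min_eq_left hj]
    constructor
    · exact fun h => ⟨hj, h⟩
    · exact fun h => h.2
  refine ⟨h0, ?_, ?_, ?_⟩
  · rcases hor with h | h
    · rw [h]; simpa using Nat.succ_pos i
    · omega
  · rcases hor with h | h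
    · rw [h]; exact Bo_zero l (i + 1)
    · exact (hQBo _ (by omega)).1 h.2.2
  · intro j hj hbj
    rcases Nat.eq_zero_or_pos j with hz | hz
    · omega
    · exact hmax j hz hj ((hQBo j (by omega)).2 hbj)

theorem set_append_len {α : Type} (A : List α) (x v : α) (B : List α) (n : Nat)
    (h : A.length = n) : (A ++ x :: B).set n v = A ++ v :: B := by
  subst h
  induction A with
  | nil => rfl
  | cons a as ih => simp [List.set, ih]

theorem funcA_loop (l : List Char) : ∀ m, m ≤ l.length →
    ((PySem.List.pyRange 1 ((m : Int) + 1) 1).foldl (fun res i =>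
      PySem.List.pySetD res (i - 1) (i - curLoop (PySem.List.slice l none (some i)) i))
      (List.replicate l.length (0 : Int))) =
    (List.range m).map (fun i : Nat => ((i : Int) + 1) - curLoop (l.take (i + 1)) ((i : Int) + 1))
      ++ List.replicate (l.length - m) (0 : Int) := by
  intro m
  induction m with
  | zero =>
    rw [PySem.List.pyRange_one_eq_nil (by norm_num)]
    intro _
    simp
  | succ m IH =>
    intro hm
    have hm' : m ≤ l.length := by omega
    have hc : ((m + 1 : Nat) : Int) = (m : Int) + 1 := by push_cast; ring
    rw [hc, PySem.List.pyRange_one_succ_right (by omega : (1 : Int) ≤ (m : Int) + 1),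
      List.foldl_append, IH hm']
    simp only [List.foldl_cons, List.foldl_nil]
    have hidx : ((m : Int) + 1) - 1 = ((m : Nat) : Int) := by ring
    have htmp : PySem.List.slice l none (some ((m : Int) + 1)) = l.take (m + 1) := by
      rw [show (m : Int) + 1 = ((m + 1 : Nat) : Int) by push_cast; ring, PySem.List.slice_to_natCast]
    rw [hidx, htmp, PySem.List.pySetD_natCast]
    have hrep : List.replicate (l.length - m) (0 : Int) =
        (0 : Int) :: List.replicate (l.length - (m + 1)) (0 : Int) := by
      rw [show l.length - m = (l.length - (m + 1)) + 1 by omega, List.replicate_succ]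
    rw [hrep]
    have hlenmap : (List.map (fun i : Nat => ((i : Int) + 1) - curLoop (l.take (i + 1)) ((i : Int) + 1)) (List.range m)).length = m := by
      simp
    rw [set_append_len _ _ _ _ _ hlenmap]
    rw [List.range_succ, List.map_append]
    simp

-- ===== VERDICT (by name: the statement is the Claim_ definition above) =====
theorem func_spec : Claim_equal_func := by
  intro s _
  show func s = func_alt s
  have hres0 : (PySem.List.pyRange 0 ((s.toList.length : Int)) 1).map (fun _ => (0 : Int)) =
      List.replicate s.toList.length (0 : Int) := by
    simp [PySem.List.pyRange_one, List.map_map, Function.comp_def, List.map_const']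
  have hfunc0 : func s = (PySem.List.pyRange 1 (PySem.Str.len s + 1) 1).foldl (fun res i =>
      PySem.List.pySetD res (i - 1) (i - curLoop (PySem.List.slice s.toList none (some i)) i))
      ((PySem.List.pyRange 0 (PySem.Str.len s) 1).map (fun _ => (0 : Int))) := rfl
  have halt0 : func_alt s = (List.range s.toList.length).map
      (fun i : Nat => ((i : Int) + 1 - (((kmpPi s.toList).getD i 0 : Nat) : Int))) := rfl
  have hA := funcA_loop s.toList s.toList.length le_rfl
  rw [hfunc0, halt0]
  simp only [PySem.Str.len_eq]
  rw [hres0, hA]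
  simp only [Nat.sub_self, List.replicate_zero, List.append_nil]
  apply List.map_congr_left
  intro i hmem
  rw [List.mem_range] at hmem
  obtain ⟨h0, hMBA⟩ := curLoop_MB s.toList i hmem
  have hMBB := kmpPi_spec s.toList i hmem
  have heq := MB_unique hMBA hMBB
  have hval : curLoop (s.toList.take (i + 1)) ((i : Int) + 1) =
      (((kmpPi s.toList).getD i 0 : Nat) : Int) := by
    rw [← heq, Int.toNat_of_nonneg h0]
  rw [hval]
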